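-- pv_equiv track=rewrite | github.com/dspcoder-org/emb-dev | setup-softwares/docker-dev-container/setupCodeBase.py | capitalize_after_underscore
-- ===== SOURCE A (Python) =====
-- def capitalize_after_underscore(snake_str):
--     """Capitalize letters after underscores and retain underscores."""
--     result = []
--     capitalize_next = False
--
--     for char in snake_str:
--         if char == '_':
--             result.append(char)
--             capitalize_next = True
--         elif capitalize_next:
--             result.append(char.upper())
--             capitalize_next = False
--         else:
--             result.append(char)
--
--     return ''.join(result)
-- ===== SOURCE B (Python) =====
-- def capitalize_after_underscore(snake_str):
--     """Capitalize letters after underscores and retain underscores."""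
--     parts = snake_str.split('_')
--     return '_'.join([parts[0]] + [p[:1].upper() + p[1:] for p in parts[1:]])
-- ===== Notes on version B (the rewrite author's own statement) =====
-- stated objective: simpler
-- what changed: Replaces the char-by-char flag state machine with split on '_', upper-casing the first character of every segment after the first, and rejoining with '_'.
import Mathlib
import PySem

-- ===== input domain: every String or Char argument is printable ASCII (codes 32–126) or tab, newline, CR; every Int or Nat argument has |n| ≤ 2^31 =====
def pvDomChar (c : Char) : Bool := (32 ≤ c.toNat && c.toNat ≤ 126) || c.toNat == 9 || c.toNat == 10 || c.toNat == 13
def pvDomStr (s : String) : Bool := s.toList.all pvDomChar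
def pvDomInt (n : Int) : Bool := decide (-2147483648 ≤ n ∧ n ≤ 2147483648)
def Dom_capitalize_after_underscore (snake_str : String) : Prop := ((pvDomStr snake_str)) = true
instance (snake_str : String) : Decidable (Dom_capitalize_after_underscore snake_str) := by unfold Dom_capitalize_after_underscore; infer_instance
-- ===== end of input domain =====

-- B replaces A's char-by-char capitalize-next flag machine with split-on-'_' / capitalize segment heads / rejoin (simpler decomposition, same cost).


-- ===== PORT A =====
-- one loop step: if char == '_' append and set flag; elif flag append char.upper() and clear; else append
def capAUStep (st : List Char × Bool) (c : Char) : List Char × Bool :=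
  if c = '_' then (st.1 ++ [c], true)
  else if st.2 then (st.1 ++ [PySem.Chars.upperChar c], false)
  else (st.1 ++ [c], false)

def capitalize_after_underscore (snake_str : String) : String :=
  String.ofList (snake_str.toList.foldl capAUStep ([], false)).1

-- ===== PORT B =====
-- p[:1].upper() + p[1:]
def capAUSeg (p : List Char) : List Char := PySem.Chars.upper (p.take 1) ++ p.drop 1

def capitalize_after_underscore_alt (snake_str : String) : String :=
  match List.splitOn '_' snake_str.toList with   -- snake_str.split('_'); never []
  | [] => ""
  | p0 :: rest => String.ofList (PySem.Chars.join ['_'] (p0 :: rest.map capAUSeg))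

-- ===== PRECONDITION & SPEC =====
def Spec_capitalize_after_underscore (snake_str : String) (out : String) : Prop := out = capitalize_after_underscore_alt snake_str
instance (snake_str : String) (out : String) : Decidable (Spec_capitalize_after_underscore snake_str out) := by unfold Spec_capitalize_after_underscore; infer_instance

-- ===== CLAIM (what is proved, stated in full; the proofs are below) =====
def Claim_equal_capitalize_after_underscore : Prop := ∀ (snake_str : String), Dom_capitalize_after_underscore snake_str → Spec_capitalize_after_underscore snake_str (capitalize_after_underscore snake_str)

-- ===== LEMMAS AND PROOFS =====

-- reference recursion: what A's flag machine emits from a suffix, given the current flag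
def capAURec : List Char → Bool → List Char
  | [], _ => []
  | c :: cs, cap =>
    if c = '_' then c :: capAURec cs true
    else if cap then PySem.Chars.upperChar c :: capAURec cs false
    else c :: capAURec cs false

theorem capAU_foldl_eq (cs : List Char) : ∀ (acc : List Char) (cap : Bool),
    (cs.foldl capAUStep (acc, cap)).1 = acc ++ capAURec cs cap := by
  induction cs with
  | nil => intro acc cap; simp [capAURec]
  | cons c cs ih =>
    intro acc cap
    by_cases h : c = '_'
    · simp [capAUStep, capAURec, h, ih]
    · cases cap <;> simp [capAUStep, capAURec, h, ih]

-- the split-and-rejoin value equals the flag machine's output, for both flag values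
theorem capAU_split_eq (cs : List Char) :
    PySem.Chars.join ['_'] ((List.splitOn '_' cs).map capAUSeg) = capAURec cs true ∧
    (∀ p0 rest, List.splitOn '_' cs = p0 :: rest →
      PySem.Chars.join ['_'] (p0 :: rest.map capAUSeg) = capAURec cs false) := by
  induction cs with
  | nil =>
    have hnil : List.splitOn '_' ([] : List Char) = [[]] := rfl
    constructor
    · rw [hnil]; simp [capAUSeg, capAURec, PySem.Chars.join, List.intercalate, PySem.Chars.upper]
    · intro p0 rest h
      rw [hnil] at h
      injection h with h1 h2
      subst h1; subst h2
      simp [capAURec, PySem.Chars.join, List.intercalate]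
  | cons c cs ih =>
    obtain ⟨ihT, ihF⟩ := ih
    obtain ⟨p, rest, hsplit⟩ : ∃ p rest, List.splitOn '_' cs = p :: rest := by
      rcases h : List.splitOn '_' cs with _ | ⟨p, rest⟩
      · exact absurd h (List.splitOnP_ne_nil _ cs)
      · exact ⟨p, rest, rfl⟩
    rw [hsplit, List.map_cons] at ihT
    have hF := ihF p rest hsplit
    have hseg0 : capAUSeg [] = [] := rfl
    by_cases h : c = '_'
    · have hcons : List.splitOn '_' (c :: cs) = [] :: p :: rest := by
        simp [List.splitOn, List.splitOnP_cons, h]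
        rw [show List.splitOnP (fun x => x == '_') cs = List.splitOn '_' cs from rfl, hsplit]
      constructor
      · rw [hcons, List.map_cons, List.map_cons, hseg0, PySem.Chars.join_cons_cons, ihT]
        simp [capAURec, h]
      · intro p0 rest' h'
        rw [hcons] at h'
        injection h' with h1 h2
        subst h1; subst h2
        rw [List.map_cons, PySem.Chars.join_cons_cons, ihT]
        simp [capAURec, h]
    · have hcons : List.splitOn '_' (c :: cs) = (c :: p) :: rest := by
        simp [List.splitOn, List.splitOnP_cons, h]
        rw [show List.splitOnP (fun x => x == '_') cs = List.splitOn '_' cs from rfl, hsplit]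
        rfl
      have hjoin : ∀ q, PySem.Chars.join ['_'] ((q :: p) :: rest.map capAUSeg)
          = q :: PySem.Chars.join ['_'] (p :: rest.map capAUSeg) := by
        intro q
        cases rest with
        | nil => simp [PySem.Chars.join, List.intercalate]
        | cons b l =>
          rw [List.map_cons, PySem.Chars.join_cons_cons, PySem.Chars.join_cons_cons]
          simp
      constructor
      · rw [hcons, List.map_cons]
        have hseg : capAUSeg (c :: p) = PySem.Chars.upperChar c :: p := by
          simp [capAUSeg, PySem.Chars.upper]
        rw [hseg, hjoin, hF]
        simp [capAURec, h]
      · intro p0 rest' h'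
        rw [hcons] at h'
        injection h' with h1 h2
        subst h1; subst h2
        rw [hjoin, hF]
        simp [capAURec, h]

-- ===== VERDICT (by name: the statement is the Claim_ definition above) =====
theorem capitalize_after_underscore_spec : Claim_equal_capitalize_after_underscore := by
  intro s _
  unfold Spec_capitalize_after_underscore capitalize_after_underscore capitalize_after_underscore_alt
  obtain ⟨p, rest, hsplit⟩ : ∃ p rest, List.splitOn '_' s.toList = p :: rest := by
    rcases h : List.splitOn '_' s.toList with _ | ⟨p, rest⟩
    · exact absurd h (List.splitOnP_ne_nil _ s.toList)
    · exact ⟨p, rest, rfl⟩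
  have hB := (capAU_split_eq s.toList).2 p rest hsplit
  rw [capAU_foldl_eq, hsplit]
  simp [← hB]
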